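-- pv_equiv track=rewrite | github.com/vladkorotnev/ayymidi | converter/sysex_proto.py | wrap_sysex_payload_bytes_old
-- ===== SOURCE A (Python) =====
-- def wrap_sysex_payload_bytes_old(accum):
--     rslt = []
--     rslt.append(len(accum))
--     i = 0
--     topbits = 0x0
--     for b in accum:
--         rslt.append(b & 0x7F)
--         topbits <<= 1
--         topbits |= (b & 0x80) >> 7
--         i += 1
--         if i == 7: # every 7 bytes, add 1 byte that contains top bits of each byte (because midi range 00..7F)
--             rslt.append(topbits)
--             topbits = 0
--             i = 0
--     rslt.append(topbits)
--     cksum = 0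
--     for b in accum:
--         cksum += b
--     cksum &= 0x7F
--     rslt.append(cksum)
--     return rslt
-- ===== SOURCE B (Python) =====
-- def wrap_sysex_payload_bytes_old(accum):
--     def topbits(chunk):
--         tb = 0
--         for b in chunk:
--             tb = (tb << 1) | ((b & 0x80) >> 7)
--         return tb
--     out = [len(accum)]
--     p = 0
--     while len(accum) - p >= 7:
--         head = accum[p:p + 7]
--         out += [b & 0x7F for b in head]
--         out.append(topbits(head))
--         p += 7
--     tail = accum[p:]
--     out += [b & 0x7F for b in tail]
--     out.append(topbits(tail))
--     out.append(sum(accum) & 0x7F)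
--     return out
-- ===== Notes on version B (the rewrite author's own statement) =====
-- stated objective: alternative
-- what changed: Replaced A's single counter-driven loop (i/topbits state reset at every 7th byte) by an index-advancing loop over explicit 7-byte slices, each emitted as its masked bytes plus a per-chunk topbits fold in a helper, the (possibly empty) remainder slice handled the same way, and the checksum via sum().
import Mathlib
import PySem

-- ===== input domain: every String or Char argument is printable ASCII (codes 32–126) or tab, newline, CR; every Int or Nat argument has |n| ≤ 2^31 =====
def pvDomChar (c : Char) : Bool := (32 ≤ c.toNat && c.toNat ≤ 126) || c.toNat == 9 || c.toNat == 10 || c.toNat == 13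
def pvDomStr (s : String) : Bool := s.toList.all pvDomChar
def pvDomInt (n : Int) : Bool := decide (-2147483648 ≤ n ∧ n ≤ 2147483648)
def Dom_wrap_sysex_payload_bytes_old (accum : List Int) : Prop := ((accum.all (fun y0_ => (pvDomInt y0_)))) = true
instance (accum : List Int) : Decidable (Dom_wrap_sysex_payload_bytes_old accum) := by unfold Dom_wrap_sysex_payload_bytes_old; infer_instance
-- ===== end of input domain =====

-- B re-decomposes A's counter-driven loop into an index-advancing 7-byte-chunk loop with a
-- separate per-chunk topbits fold; same asymptotic cost, alternative structure.

-- ===== PORT A =====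
-- A's loop body, named as a helper (used verbatim by the fold below)
def pvStepA (s : List Int × Int × Int) (b : Int) : List Int × Int × Int :=
  let rslt := s.1 ++ [PySem.Int.band b 0x7F]
  let topbits := PySem.Int.bor (s.2.2 <<< (1 : Nat)) (PySem.Int.band b 0x80 >>> (7 : Nat))
  let i := s.2.1 + 1
  if i == 7 then (rslt ++ [topbits], 0, 0) else (rslt, i, topbits)

-- literal transliteration of A: one fold over accum with state (rslt, i, topbits)
def wrap_sysex_payload_bytes_old (accum : List Int) : List Int :=
  let init : List Int × Int × Int := ([(accum.length : Int)], 0, 0)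
  let s := accum.foldl pvStepA init
  let rslt := s.1 ++ [s.2.2]
  let cksum := PySem.Int.band (accum.foldl (fun c b => c + b) 0) 0x7F
  rslt ++ [cksum]

-- ===== PORT B =====
-- helper 'topbits' of Source B
def pvTopbits (chunk : List Int) : Int :=
  chunk.foldl (fun tb b => PySem.Int.bor (tb <<< (1 : Nat)) (PySem.Int.band b 0x80 >>> (7 : Nat))) 0

-- the while-loop of Source B: emit the 7-byte chunk at index p, advance p by 7; then the remainder accum[p:]
def pvChunksFrom (accum : List Int) (p : Nat) : List Int :=
  if _h : 7 ≤ accum.length - p then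
    let head := PySem.List.slice accum (some (p : Int)) (some ((p : Int) + 7))
    (head.map (fun b => PySem.Int.band b 0x7F) ++ [pvTopbits head]) ++ pvChunksFrom accum (p + 7)
  else
    let tail := PySem.List.slice accum (some (p : Int)) none
    tail.map (fun b => PySem.Int.band b 0x7F) ++ [pvTopbits tail]
termination_by accum.length - p
decreasing_by omega

def wrap_sysex_payload_bytes_old_alt (accum : List Int) : List Int :=
  ((accum.length : Int) :: pvChunksFrom accum 0) ++ [PySem.Int.band (accum.foldl (fun c b => c + b) 0) 0x7F]

-- ===== PRECONDITION & SPEC =====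
def Spec_wrap_sysex_payload_bytes_old (accum : List Int) (out : List Int) : Prop := out = wrap_sysex_payload_bytes_old_alt accum
instance (accum : List Int) (out : List Int) : Decidable (Spec_wrap_sysex_payload_bytes_old accum out) := by unfold Spec_wrap_sysex_payload_bytes_old; infer_instance

-- ===== CLAIM (what is proved, stated in full; the proofs are below) =====
def Claim_equal_wrap_sysex_payload_bytes_old : Prop := ∀ (accum : List Int), Dom_wrap_sysex_payload_bytes_old accum → Spec_wrap_sysex_payload_bytes_old accum (wrap_sysex_payload_bytes_old accum)

-- ===== LEMMAS AND PROOFS =====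

-- proof-side restatement of B's chunk loop on the suffix accum.drop p
def pvChunks (rest : List Int) : List Int :=
  if _h : 7 ≤ rest.length then
    ((rest.take 7).map (fun b => PySem.Int.band b 0x7F) ++ [pvTopbits (rest.take 7)]) ++ pvChunks (rest.drop 7)
  else
    rest.map (fun b => PySem.Int.band b 0x7F) ++ [pvTopbits rest]
termination_by rest.length
decreasing_by simp; omega

-- B's index-advancing loop computes pvChunks of the remaining suffix
theorem pvChunksFrom_eq (accum : List Int) (p : Nat) :
    pvChunksFrom accum p = pvChunks (accum.drop p) := by
  rw [pvChunksFrom, pvChunks]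
  have hlen : (accum.drop p).length = accum.length - p := by simp
  by_cases h : 7 ≤ accum.length - p
  · simp only [h, hlen, dif_pos]
    have hhead : PySem.List.slice accum (some (p : Int)) (some ((p : Int) + 7))
        = (accum.drop p).take 7 := by
      have := PySem.List.slice_natCast_add accum p 7
      simpa using this
    rw [hhead, pvChunksFrom_eq accum (p + 7)]
    simp [List.drop_drop]
  · simp only [h, hlen, dif_neg, not_false_iff]
    rw [PySem.List.slice_from_natCast]
termination_by accum.length - p
decreasing_by omega

-- A's fold over a short suffix never fires the i == 7 branch
theorem pvFoldA_short (xs : List Int) (r : List Int) (i0 : Nat) (tb : Int)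
    (h : i0 + xs.length < 7) :
    xs.foldl pvStepA (r, (i0 : Int), tb)
      = (r ++ xs.map (fun b => PySem.Int.band b 0x7F), ((i0 + xs.length : Nat) : Int),
         xs.foldl (fun tb b => PySem.Int.bor (tb <<< (1 : Nat)) (PySem.Int.band b 0x80 >>> (7 : Nat))) tb) := by
  induction xs generalizing r i0 tb with
  | nil => simp
  | cons b bs ih =>
    have hne : ((i0 : Int) + 1 == 7) = false := by
      simp at h ⊢; omega
    simp only [List.foldl_cons, pvStepA, hne]
    simp only [if_false, Bool.false_eq_true]
    have hcast : ((i0 : Int) + 1) = ((i0 + 1 : Nat) : Int) := by push_cast; ring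
    rw [hcast, ih _ _ _ (by simp at h ⊢; omega)]
    simp
    omega

-- A's fold over a full 7-byte chunk from counter 0 fires the branch exactly at the end
theorem pvFoldA_chunk7 (xs : List Int) (r : List Int)
    (h : xs.length = 7) :
    xs.foldl pvStepA (r, (0 : Int), 0)
      = (r ++ xs.map (fun b => PySem.Int.band b 0x7F) ++ [pvTopbits xs], 0, 0) := by
  match xs, h with
  | [b1, b2, b3, b4, b5, b6, b7], _ =>
    simp [pvStepA, pvTopbits, List.foldl_cons, List.append_assoc]

-- main loop correspondence: A's fold (plus its trailing topbits byte) = B's chunk recursion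
theorem pvFoldA_chunks (xs : List Int) (r : List Int) :
    (xs.foldl pvStepA (r, (0 : Int), 0)).1 ++ [(xs.foldl pvStepA (r, (0 : Int), 0)).2.2]
      = r ++ pvChunks xs := by
  by_cases h : 7 ≤ xs.length
  · rw [pvChunks]
    simp only [h, dif_pos]
    have hlen : (xs.take 7).length = 7 := by simp; omega
    conv_lhs => rw [show xs = xs.take 7 ++ xs.drop 7 from (List.take_append_drop 7 xs).symm]
    rw [List.foldl_append, pvFoldA_chunk7 _ _ hlen,
        pvFoldA_chunks (xs.drop 7) (r ++ (xs.take 7).map (fun b => PySem.Int.band b 0x7F) ++ [pvTopbits (xs.take 7)])]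
    simp [List.append_assoc]
  · rw [pvChunks]
    simp only [h, dif_neg, not_false_iff]
    have hfold := pvFoldA_short xs r 0 0 (by omega)
    simp only [Nat.cast_zero, zero_add] at hfold
    rw [hfold]
    simp [pvTopbits]
termination_by xs.length
decreasing_by simp; omega

-- ===== VERDICT (by name: the statement is the Claim_ definition above) =====
theorem wrap_sysex_payload_bytes_old_spec : Claim_equal_wrap_sysex_payload_bytes_old := by
  intro accum _
  unfold Spec_wrap_sysex_payload_bytes_old wrap_sysex_payload_bytes_old wrap_sysex_payload_bytes_old_alt
  have h := pvFoldA_chunks accum [(accum.length : Int)]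
  have hsplit : ∀ (l : List Int) (x c : Int), l ++ [x, c] = (l ++ [x]) ++ [c] := by simp
  simp only [List.cons_append, List.nil_append, List.append_assoc] at h ⊢
  rw [pvChunksFrom_eq, List.drop_zero, hsplit, h]
  simp
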